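-- pv_equiv track=rewrite | github.com/SarahElzayat/RSA-Secure-Chat | utils.py | alphabet_encryption
-- ===== SOURCE A (Python) =====
-- def alphabet_encryption(msg):
--     '''
--         Function for encrypting 5 chars of a message as specified in the document
--     '''
--     encrypted_message = 0
--
--     for i, c in enumerate(msg):
--         if 47 < ord(c) < 58:
--             encrypted_message += int(c) * 37**i  # keep numbers from 0 - 9
--
--         elif 96 < ord(c) < 123:  # map chars from a-z to 10-35
--             encrypted_message += (ord(c) - 87) * 37**i
--
--         else:
--             encrypted_message += 36 * 37**i  # map space or any other special character to 36
--
--     return encrypted_message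
-- ===== SOURCE B (Python) =====
-- def alphabet_encryption(msg):
--     """Horner scheme over the reversed message: one multiply per char, no 37**i."""
--     acc = 0
--     for c in reversed(msg):
--         o = ord(c)
--         if 48 <= o <= 57:
--             d = o - 48
--         elif 97 <= o <= 122:
--             d = o - 87
--         else:
--             d = 36
--         acc = acc * 37 + d
--     return acc
-- ===== Notes on version B (the rewrite author's own statement) =====
-- stated objective: faster
-- what changed: Replaces per-character recomputation of 37**i with a Horner scheme over the reversed string (one multiplication per character).
import Mathlib
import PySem

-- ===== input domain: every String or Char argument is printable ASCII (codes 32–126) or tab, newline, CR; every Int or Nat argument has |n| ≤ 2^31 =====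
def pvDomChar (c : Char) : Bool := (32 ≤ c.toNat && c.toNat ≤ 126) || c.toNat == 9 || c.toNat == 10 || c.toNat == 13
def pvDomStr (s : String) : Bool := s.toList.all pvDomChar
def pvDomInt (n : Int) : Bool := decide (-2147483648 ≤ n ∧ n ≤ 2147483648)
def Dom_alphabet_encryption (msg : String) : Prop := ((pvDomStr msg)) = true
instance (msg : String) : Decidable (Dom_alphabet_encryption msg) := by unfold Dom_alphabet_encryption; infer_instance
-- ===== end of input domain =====

-- B replaces A's per-character 37**i recomputation with a Horner scheme over the reversed string (faster).


-- ===== PORT A =====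
-- the per-character contribution of A (int(c) on a digit char '0'..'9' equals ord(c)-48)
def aeDigitA (c : Char) : Int :=
  if 47 < c.toNat ∧ c.toNat < 58 then (c.toNat : Int) - 48
  else if 96 < c.toNat ∧ c.toNat < 123 then (c.toNat : Int) - 87
  else 36

-- 37**i, ported as plain structural recursion (kernel-transparent)
def aePow : Nat → Int
  | 0 => 1
  | i + 1 => 37 * aePow i

-- the 'for i, c in enumerate(msg)' loop: index and accumulator carried along
def aeGoA : List Char → Nat → Int → Int
  | [], _, acc => acc
  | c :: t, i, acc => aeGoA t (i + 1) (acc + aeDigitA c * aePow i)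

def alphabet_encryption (msg : String) : Int := aeGoA msg.toList 0 0

-- ===== PORT B =====
def aeDigitB (c : Char) : Int :=
  if 48 ≤ c.toNat ∧ c.toNat ≤ 57 then (c.toNat : Int) - 48
  else if 97 ≤ c.toNat ∧ c.toNat ≤ 122 then (c.toNat : Int) - 87
  else 36

-- the 'for c in reversed(msg)' Horner loop
def aeGoB : List Char → Int → Int
  | [], acc => acc
  | c :: t, acc => aeGoB t (acc * 37 + aeDigitB c)

def alphabet_encryption_alt (msg : String) : Int := aeGoB msg.toList.reverse 0

-- ===== PRECONDITION & SPEC =====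
def Spec_alphabet_encryption (msg : String) (out : Int) : Prop := out = alphabet_encryption_alt msg
instance (msg : String) (out : Int) : Decidable (Spec_alphabet_encryption msg out) := by unfold Spec_alphabet_encryption; infer_instance

-- ===== CLAIM (what is proved, stated in full; the proofs are below) =====
def Claim_equal_alphabet_encryption : Prop := ∀ (msg : String), Dom_alphabet_encryption msg → Spec_alphabet_encryption msg (alphabet_encryption msg)

-- ===== LEMMAS AND PROOFS =====

-- the common mathematical value: base-37 little-endian number of the digit list
def aeVal (l : List Char) : Int :=
  match l with
  | [] => 0
  | c :: t => aeDigitA c + 37 * aeVal t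

theorem aeDigit_eq (c : Char) : aeDigitB c = aeDigitA c := by
  unfold aeDigitA aeDigitB
  split_ifs <;> omega

theorem aePow_succ (i : Nat) : aePow (i + 1) = aePow i * 37 := by
  simp [aePow]; ring

theorem aeGoA_eq (l : List Char) : ∀ (i : Nat) (acc : Int),
    aeGoA l i acc = acc + aePow i * aeVal l := by
  induction l with
  | nil => intro i acc; simp [aeGoA, aeVal]
  | cons c t ih =>
    intro i acc
    simp only [aeGoA, aeVal, ih, aePow_succ]
    ring

theorem aeGoB_append (xs : List Char) (c : Char) : ∀ (acc : Int),
    aeGoB (xs ++ [c]) acc = aeGoB xs acc * 37 + aeDigitB c := by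
  induction xs with
  | nil => intro acc; simp [aeGoB]
  | cons x t ih => intro acc; simp [aeGoB, ih]

theorem aeGoB_reverse (l : List Char) : aeGoB l.reverse 0 = aeVal l := by
  induction l with
  | nil => simp [aeGoB, aeVal]
  | cons c t ih =>
    simp only [List.reverse_cons, aeGoB_append, ih, aeVal, aeDigit_eq]
    ring

-- ===== VERDICT (by name: the statement is the Claim_ definition above) =====
theorem alphabet_encryption_spec : Claim_equal_alphabet_encryption := by
  intro msg _
  unfold Spec_alphabet_encryption alphabet_encryption alphabet_encryption_alt
  rw [aeGoA_eq, aeGoB_reverse]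
  simp [aePow]
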